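-- pv_equiv track=rewrite | github.com/MASSIVEMAGNETICS/miniature-telegram | aetherforge/perimeter.py | _blade_product
-- ===== SOURCE A (Python) =====
-- def _blade_product(a: tuple, b: tuple):
--     """
--     Compute the geometric product of two basis blades in Cl(3,0).
--
--     Returns (sign: int, result_blade: tuple).
--     e_i * e_i = +1 in Cl(3,0).
--     """
--     sequence = list(a) + list(b)
--     sign = 1
--     # Insertion sort while counting swaps (each swap flips sign)
--     for i in range(1, len(sequence)):
--         key = sequence[i]
--         j = i - 1
--         while j >= 0 and sequence[j] > key:
--             sequence[j + 1] = sequence[j]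
--             sign *= -1
--             j -= 1
--         sequence[j + 1] = key
--     # Cancel identical adjacent pairs (e_k * e_k = +1 in Cl(3,0))
--     result: list = []
--     k = 0
--     while k < len(sequence):
--         if k + 1 < len(sequence) and sequence[k] == sequence[k + 1]:
--             k += 2  # e_i^2 = +1 in Cl(3,0): cancels with no extra sign change
--         else:
--             result.append(sequence[k])
--             k += 1
--     return sign, tuple(result)
-- ===== SOURCE B (Python) =====
-- def _blade_product(a: tuple, b: tuple):
--     """
--     Compute the geometric product of two basis blades in Cl(3,0).
--
--     Returns (sign: int, result_blade: tuple).
--     e_i * e_i = +1 in Cl(3,0).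
--     """
--     seq = list(a) + list(b)
--
--     def sort_count(lst):
--         # Merge sort returning (sorted list, number of inversions).
--         if len(lst) <= 1:
--             return lst, 0
--         mid = len(lst) // 2
--         left, linv = sort_count(lst[:mid])
--         right, rinv = sort_count(lst[mid:])
--         merged = []
--         inv = linv + rinv
--         i = j = 0
--         while i < len(left) and j < len(right):
--             if left[i] <= right[j]:
--                 merged.append(left[i])
--                 i += 1
--             else:
--                 inv += len(left) - i  # every remaining left element inverts with right[j]
--                 merged.append(right[j])
--                 j += 1
--         merged.extend(left[i:])
--         merged.extend(right[j:])
--         return merged, inv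
--
--     s, inv = sort_count(seq)
--     # Cancel identical adjacent pairs (e_k * e_k = +1 in Cl(3,0))
--     result = []
--     k = 0
--     while k < len(s):
--         if k + 1 < len(s) and s[k] == s[k + 1]:
--             k += 2
--         else:
--             result.append(s[k])
--             k += 1
--     return (1 if inv % 2 == 0 else -1), tuple(result)
-- ===== Notes on version B (the rewrite author's own statement) =====
-- stated objective: faster
-- what changed: Replaces the O(n^2) shift-based insertion sort with swap counting by a merge sort that counts inversions, deriving the sign from the inversion-count parity; cancellation stays a linear adjacent-pair scan.
import Mathlib
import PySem

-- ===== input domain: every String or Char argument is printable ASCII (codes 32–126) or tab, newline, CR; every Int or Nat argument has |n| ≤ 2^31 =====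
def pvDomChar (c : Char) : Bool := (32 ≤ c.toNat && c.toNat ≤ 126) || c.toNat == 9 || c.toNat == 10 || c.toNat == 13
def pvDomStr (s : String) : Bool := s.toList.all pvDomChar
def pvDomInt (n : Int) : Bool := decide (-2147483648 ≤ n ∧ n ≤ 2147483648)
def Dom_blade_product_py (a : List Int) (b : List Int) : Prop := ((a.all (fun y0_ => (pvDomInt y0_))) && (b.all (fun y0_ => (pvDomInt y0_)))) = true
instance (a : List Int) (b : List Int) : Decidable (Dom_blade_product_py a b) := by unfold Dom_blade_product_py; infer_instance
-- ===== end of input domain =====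

-- B replaces A's O(n^2) shift-based insertion sort (swap counting) by an O(n log n)
-- merge sort counting inversions; the sign is the parity of the inversion count.

-- ===== PORT A =====
-- Inner `while j >= 0 and sequence[j] > key` loop of A, plus the final
-- `sequence[j + 1] = key` write.  Fuel n = j + 1 (n = 0 means j = -1, loop over).
-- All indices touched are provably in range, so List.getD / List.set are exact
-- for Python's sequence[j] / sequence[j+1] = v here.
def innerA : Nat → List Int → Int → Int → List Int × Int
  | 0, seq, key, sign => (seq.set 0 key, sign)
  | n + 1, seq, key, sign =>
    if seq.getD n 0 > key then
      innerA n (seq.set (n + 1) (seq.getD n 0)) key (sign * (-1))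
    else
      (seq.set (n + 1) key, sign)

-- A's final cancellation scan (`while k < len(sequence): …`), index k walking the
-- sorted list: the obvious structural recursion over the same comparisons.
def cancelA : List Int → List Int
  | [] => []
  | [x] => [x]
  | x :: y :: rest => if x == y then cancelA rest else x :: cancelA (y :: rest)

def blade_product_py (a : List Int) (b : List Int) : Int × List Int :=
  let sequence := a ++ b
  let st := (PySem.List.pyRange 1 (sequence.length : Int) 1).foldl
    (fun st i =>
      let key := PySem.List.pyGetD st.1 i 0
      innerA i.toNat st.1 key st.2) (sequence, (1 : Int))
  (st.2, cancelA st.1)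

-- ===== PORT B =====
-- Merge step of Source B's sort_count: merges two lists, adding len(left)-i whenever a
-- right element is emitted.
def mergeCnt : List Int → List Int → List Int × Nat
  | [], r => (r, 0)
  | l, [] => (l, 0)
  | x :: xs, y :: ys =>
    if x ≤ y then
      let m := mergeCnt xs (y :: ys)
      (x :: m.1, m.2)
    else
      let m := mergeCnt (x :: xs) ys
      (y :: m.1, m.2 + (x :: xs).length)
termination_by l r => l.length + r.length

-- Source B's sort_count: merge sort returning (sorted list, inversion count).
def sortCnt (l : List Int) : List Int × Nat :=
  if l.length ≤ 1 then (l, 0)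
  else
    let mid := l.length / 2
    let L := sortCnt (l.take mid)
    let R := sortCnt (l.drop mid)
    let m := mergeCnt L.1 R.1
    (m.1, L.2 + R.2 + m.2)
termination_by l.length
decreasing_by
  · simp; omega
  · simp; omega

-- Source B's cancellation scan (same linear adjacent-pair scan as A's).
def cancelB : List Int → List Int
  | [] => []
  | [x] => [x]
  | x :: y :: rest => if x == y then cancelB rest else x :: cancelB (y :: rest)

def blade_product_py_alt (a : List Int) (b : List Int) : Int × List Int :=
  let seq := a ++ b
  let s := sortCnt seq
  ((if s.2 % 2 == 0 then (1 : Int) else -1), cancelB s.1)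

-- ===== PRECONDITION & SPEC =====
def Spec_blade_product_py (a : List Int) (b : List Int) (out : Int × List Int) : Prop := out = blade_product_py_alt a b
instance (a : List Int) (b : List Int) (out : Int × List Int) : Decidable (Spec_blade_product_py a b out) := by unfold Spec_blade_product_py; infer_instance

-- ===== CLAIM (what is proved, stated in full; the proofs are below) =====
def Claim_equal_blade_product_py : Prop := ∀ (a : List Int) (b : List Int), Dom_blade_product_py a b → Spec_blade_product_py a b (blade_product_py a b)

-- ===== LEMMAS AND PROOFS =====

-- Functional model of A's insertion step: insert key before the first strictly
-- greater element.
def insA (key : Int) : List Int → List Int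
  | [] => [key]
  | x :: xs => if key < x then key :: x :: xs else x :: insA key xs

-- Functional model of A's whole loop: fold inserting each element, accumulating the
-- number of strictly-greater elements it passes.
def ISf (st : List Int × Nat) (l : List Int) : List Int × Nat :=
  l.foldl (fun st x => (insA x st.1, st.2 + st.1.countP (fun y => decide (x < y)))) st

-- Number of inversions.
def invC : List Int → Nat
  | [] => 0
  | x :: xs => xs.countP (fun y => decide (y < x)) + invC xs

theorem insA_perm (key : Int) (l : List Int) : List.Perm (insA key l) (key :: l) := by
  induction l with
  | nil => simp [insA]
  | cons x xs ih =>
    simp only [insA]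
    split
    · exact List.Perm.refl _
    · exact (List.Perm.cons x ih).trans (List.Perm.swap _ _ _)

theorem insA_countP (key : Int) (l : List Int) (p : Int → Bool) :
    (insA key l).countP p = l.countP p + (if p key then 1 else 0) := by
  rw [(insA_perm key l).countP_eq p, List.countP_cons]

theorem insA_sorted {l : List Int} (key : Int) (h : l.Pairwise (· ≤ ·)) :
    (insA key l).Pairwise (· ≤ ·) := by
  induction l with
  | nil => simp [insA]
  | cons x xs ih =>
    rw [List.pairwise_cons] at h
    simp only [insA]
    split
    · rename_i hlt
      rw [List.pairwise_cons]
      constructor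
      · intro b hb
        rcases List.mem_cons.1 hb with rfl | hb
        · exact le_of_lt hlt
        · exact le_of_lt (lt_of_lt_of_le hlt (h.1 b hb))
      · rw [List.pairwise_cons]; exact h
    · rename_i hnlt
      rw [List.pairwise_cons]
      refine ⟨?_, ih h.2⟩
      intro b hb
      rcases List.mem_cons.1 ((insA_perm key xs).mem_iff.1 hb) with rfl | h'
      · omega
      · exact h.1 b h'

theorem insA_append_of_lt (key x : Int) (p : List Int) (h : key < x) :
    insA key (p ++ [x]) = insA key p ++ [x] := by
  induction p with
  | nil => simp [insA, h]
  | cons z p ih => simp only [List.cons_append, insA]; split <;> simp [ih]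

theorem insA_of_forall_le (key : Int) {l : List Int} (h : ∀ z ∈ l, ¬ key < z) :
    insA key l = l ++ [key] := by
  induction l with
  | nil => rfl
  | cons x xs ih =>
    simp only [insA]
    rw [if_neg (h x (by simp))]
    simp [ih (fun z hz => h z (by simp [hz]))]

theorem cancelAB : ∀ l, cancelA l = cancelB l := by
  intro l
  induction l using cancelA.induct <;> simp [cancelA, cancelB, *]

-- innerA on p ++ c :: t with fuel |p| (j = |p| - 1), p the sorted prefix:
-- inserts key into p, flipping the sign once per passed (strictly greater) element.
theorem innerA_spec (p : List Int) (c : Int) (t : List Int) (key sign : Int)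
    (hp : p.Pairwise (· ≤ ·)) :
    innerA p.length (p ++ c :: t) key sign
      = (insA key p ++ t, sign * (-1) ^ (p.countP (fun y => decide (key < y)))) := by
  induction p using List.reverseRecOn generalizing c t sign with
  | nil => simp [innerA, insA]
  | append_singleton p x ih =>
    have hassoc : (p ++ [x]) ++ c :: t = p ++ (x :: c :: t) := by simp
    have hget : ((p ++ [x]) ++ c :: t).getD p.length 0 = x := by
      rw [hassoc]; simp [List.getD]
    have hset : ∀ v : Int, ((p ++ [x]) ++ c :: t).set (p.length + 1) v = (p ++ [x]) ++ v :: t := by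
      intro v
      rw [List.set_append_right _ _ (by simp)]
      simp
    have hlen : (p ++ [x]).length = p.length + 1 := by simp
    rw [hlen]
    rw [innerA, hget]
    by_cases hx : key < x
    · rw [if_pos (by exact hx), hset x]
      have hassoc2 : (p ++ [x]) ++ x :: t = p ++ x :: (x :: t) := by simp
      rw [hassoc2, ih x (x :: t) (sign * (-1)) (hp.sublist (by simp))]
      have h1 : insA key (p ++ [x]) = insA key p ++ [x] := insA_append_of_lt key x p hx
      have h2 : (p ++ [x]).countP (fun y => decide (key < y))
          = p.countP (fun y => decide (key < y)) + 1 := by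
        rw [List.countP_append]; simp [hx]
      rw [h1, h2, pow_succ, Prod.mk.injEq]
      exact ⟨by simp, by ring⟩
    · rw [if_neg (by exact hx), hset key]
      have hple : ∀ z ∈ p ++ [x], ¬ key < z := by
        intro z hz
        rcases List.mem_append.1 hz with hz | hz
        · have hzx : z ≤ x := by
            rw [List.pairwise_append] at hp
            simpa using hp.2.2 z hz x (by simp)
          omega
        · simp at hz; omega
      have h1 : insA key (p ++ [x]) = (p ++ [x]) ++ [key] := insA_of_forall_le key hple
      have h2 : (p ++ [x]).countP (fun y => decide (key < y)) = 0 := by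
        rw [List.countP_eq_zero]
        intro z hz
        simpa using hple z hz
      rw [h1, h2]
      simp

theorem sum_map_add_nat (l : List Int) (f g : Int → Nat) :
    (l.map (fun x => f x + g x)).sum = (l.map f).sum + (l.map g).sum := by
  induction l with
  | nil => rfl
  | cons x xs ih => simp [ih]; omega

theorem sum_map_ite (l : List Int) (p : Int → Bool) :
    (l.map (fun x => if p x then 1 else 0)).sum = l.countP p := by
  induction l with
  | nil => rfl
  | cons x xs ih => simp [List.countP_cons, ih]; split <;> omega

theorem ISf_perm (s : List Int) (c : Nat) (l : List Int) : List.Perm ((ISf (s, c) l).1) (s ++ l) := by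
  induction l generalizing s c with
  | nil => simp [ISf]
  | cons x xs ih =>
    have h1 := ih (insA x s) (c + s.countP (fun y => decide (x < y)))
    have h2 : List.Perm (insA x s ++ xs) (s ++ x :: xs) :=
      ((insA_perm x s).append_right xs).trans List.perm_middle.symm
    exact (h1.trans h2)

theorem ISf_sorted (s : List Int) (c : Nat) (l : List Int) (hs : s.Pairwise (· ≤ ·)) :
    ((ISf (s, c) l).1).Pairwise (· ≤ ·) := by
  induction l generalizing s c with
  | nil => exact hs
  | cons x xs ih => exact ih _ _ (insA_sorted x hs)

theorem ISf_count (s : List Int) (c : Nat) (l : List Int) :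
    (ISf (s, c) l).2 = c + invC l + (l.map (fun x => s.countP (fun y => decide (x < y)))).sum := by
  induction l generalizing s c with
  | nil => simp [ISf, invC]
  | cons x xs ih =>
    show (ISf (insA x s, c + s.countP (fun y => decide (x < y))) xs).2 = _
    rw [ih]
    have hmap : (xs.map (fun z => (insA x s).countP (fun y => decide (z < y))))
        = (xs.map (fun z => s.countP (fun y => decide (z < y)) + (if decide (z < x) then 1 else 0))) :=
      List.map_congr_left (fun z _ => insA_countP x s (fun y => decide (z < y)))
    have hsplit : (xs.map (fun z => s.countP (fun y => decide (z < y)) + (if decide (z < x) then 1 else 0))).sum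
        = (xs.map (fun z => s.countP (fun y => decide (z < y)))).sum + xs.countP (fun z => decide (z < x)) := by
      rw [sum_map_add_nat xs (fun z => s.countP (fun y => decide (z < y))) (fun z => if decide (z < x) then 1 else 0),
        sum_map_ite]
    rw [hmap, hsplit]
    simp only [invC, List.map_cons, List.sum_cons]
    omega

-- State of A's outer loop after the indices 1,…,k-1 (k ≤ |orig|).
theorem outer_inv (orig : List Int) (k : Nat) (hk : k ≤ orig.length) :
    (PySem.List.pyRange 1 (k : Int) 1).foldl
      (fun st i =>
        let key := PySem.List.pyGetD st.1 i 0
        innerA i.toNat st.1 key st.2) (orig, (1 : Int))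
      = ((ISf ([], 0) (orig.take k)).1 ++ orig.drop k,
          (-1) ^ ((ISf ([], 0) (orig.take k)).2)) := by
  induction k with
  | zero =>
    rw [PySem.List.pyRange_one_eq_nil (by omega)]
    simp [ISf]
  | succ k ihk =>
    have hk1 : k < orig.length := by omega
    by_cases hk0 : k = 0
    · subst hk0
      rw [PySem.List.pyRange_one_eq_nil (by omega)]
      obtain ⟨o, rest, rfl⟩ : ∃ o rest, orig = o :: rest := by
        cases orig with
        | nil => simp at hk1
        | cons o rest => exact ⟨o, rest, rfl⟩
      simp [ISf, insA, List.foldl_nil]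
    · have hcast : ((k + 1 : Nat) : Int) = (k : Int) + 1 := by push_cast; ring
      rw [hcast, PySem.List.pyRange_one_succ_right (by omega), List.foldl_append,
        ihk (by omega)]
      simp only [List.foldl_cons, List.foldl_nil, PySem.List.pyGetD_natCast]
      have hPlen : (ISf ([], 0) (orig.take k)).1.length = k := by
        have := (ISf_perm [] 0 (orig.take k)).length_eq
        simpa [List.length_take, Nat.min_eq_left (le_of_lt hk1)] using this
      have hdrop : orig.drop k = orig[k] :: orig.drop (k + 1) :=
        List.drop_eq_getElem_cons hk1
      have hget : ∀ (P : List Int) (v : Int) (rest : List Int), P.length = k →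
          (P ++ v :: rest).getD k 0 = v := by
        intro P v rest h
        subst h
        simp [List.getD]
      have htoNat : ((k : Int)).toNat = k := by omega
      have hspec := innerA_spec (ISf ([], 0) (orig.take k)).1 orig[k] (orig.drop (k + 1))
        orig[k] ((-1) ^ ((ISf ([], 0) (orig.take k)).2))
        (ISf_sorted [] 0 (orig.take k) (by simp))
      rw [hPlen] at hspec
      rw [hdrop, hget _ _ _ hPlen, htoNat, hspec]
      have htake : orig.take (k + 1) = orig.take k ++ [orig[k]] := by
        rw [List.take_succ, List.getElem?_eq_getElem hk1]
        rfl
      have hIS : ISf ([], 0) (orig.take (k + 1))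
          = (insA orig[k] (ISf ([], 0) (orig.take k)).1,
             (ISf ([], 0) (orig.take k)).2
               + (ISf ([], 0) (orig.take k)).1.countP (fun y => decide (orig[k] < y))) := by
        rw [htake]
        unfold ISf
        rw [List.foldl_append]
        simp
      rw [hIS, pow_add]

-- double counting: Σ_{x∈L} #{y∈R : y<x} = Σ_{y∈R} #{x∈L : y<x}
theorem cross_swap (L R : List Int) :
    (L.map (fun x => R.countP (fun y => decide (y < x)))).sum
      = (R.map (fun y => L.countP (fun x => decide (y < x)))).sum := by
  induction L with
  | nil => simp
  | cons x L ih =>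
    simp only [List.map_cons, List.sum_cons, ih]
    have hmap : (R.map (fun y => (x :: L).countP (fun x' => decide (y < x'))))
        = (R.map (fun y => (if decide (y < x) then 1 else 0) + L.countP (fun x' => decide (y < x')))) := by
      refine List.map_congr_left (fun y _ => ?_)
      rw [List.countP_cons]
      omega
    rw [hmap, sum_map_add_nat, sum_map_ite]

theorem invC_append (L R : List Int) :
    invC (L ++ R) = invC L + invC R + (L.map (fun x => R.countP (fun y => decide (y < x)))).sum := by
  induction L with
  | nil => simp [invC]
  | cons x L ih => simp [invC, ih, List.countP_append]; omega

theorem mergeCnt_perm (l r : List Int) : List.Perm ((mergeCnt l r).1) (l ++ r) := by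
  induction l, r using mergeCnt.induct with
  | case1 r => simp [mergeCnt]
  | case2 l h => rw [mergeCnt.eq_def]; split <;> simp_all
  | case3 x xs y ys h ih =>
    rw [mergeCnt]
    simp only [if_pos h]
    exact (ih.cons x)
  | case4 x xs y ys h ih =>
    rw [mergeCnt]
    simp only [if_neg h]
    exact (ih.cons y).trans List.perm_middle.symm

theorem mergeCnt_sorted (l r : List Int) (hl : l.Pairwise (· ≤ ·)) (hr : r.Pairwise (· ≤ ·)) :
    ((mergeCnt l r).1).Pairwise (· ≤ ·) := by
  induction l, r using mergeCnt.induct with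
  | case1 r => simpa [mergeCnt]
  | case2 l h => rw [mergeCnt.eq_def]; split <;> simp_all
  | case3 x xs y ys h ih =>
    rw [List.pairwise_cons] at hl
    rw [mergeCnt]
    simp only [if_pos h]
    rw [List.pairwise_cons]
    refine ⟨?_, ih hl.2 hr⟩
    intro b hb
    rcases List.mem_append.1 ((mergeCnt_perm xs (y :: ys)).mem_iff.1 hb) with hb | hb
    · exact hl.1 b hb
    · rcases List.mem_cons.1 hb with rfl | hb
      · exact h
      · exact le_trans h ((List.pairwise_cons.1 hr).1 b hb)
  | case4 x xs y ys h ih =>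
    rw [List.pairwise_cons] at hl hr
    rw [mergeCnt]
    simp only [if_neg h]
    rw [List.pairwise_cons]
    refine ⟨?_, ih (List.pairwise_cons.2 hl) hr.2⟩
    intro b hb
    rcases List.mem_append.1 ((mergeCnt_perm (x :: xs) ys).mem_iff.1 hb) with hb | hb
    · rcases List.mem_cons.1 hb with rfl | hb
      · omega
      · exact le_trans (by omega) (hl.1 b hb)
    · exact hr.1 b hb

theorem mergeCnt_count (l r : List Int) (hl : l.Pairwise (· ≤ ·)) (hr : r.Pairwise (· ≤ ·)) :
    (mergeCnt l r).2 = (r.map (fun y => l.countP (fun x => decide (y < x)))).sum := by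
  induction l, r using mergeCnt.induct with
  | case1 r => simp [mergeCnt]
  | case2 l h =>
    rw [mergeCnt.eq_def]; split <;> simp_all
  | case3 x xs y ys h ih =>
    rw [mergeCnt]
    simp only [if_pos h]
    rw [ih (List.pairwise_cons.1 hl).2 hr]
    have hmap : (((y :: ys)).map (fun z => (x :: xs).countP (fun t => decide (z < t))))
        = (((y :: ys)).map (fun z => xs.countP (fun t => decide (z < t)))) := by
      refine List.map_congr_left (fun z hz => ?_)
      rw [List.countP_cons]
      have hzx : ¬ z < x := by
        rcases List.mem_cons.1 hz with rfl | hz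
        · omega
        · have := (List.pairwise_cons.1 hr).1 z hz; omega
      simp [hzx]
    rw [hmap]
  | case4 x xs y ys h ih =>
    rw [mergeCnt]
    simp only [if_neg h]
    rw [ih hl (List.pairwise_cons.1 hr).2]
    have hcnt : (x :: xs).countP (fun t => decide (y < t)) = (x :: xs).length := by
      rw [List.countP_eq_length]
      intro t ht
      rcases List.mem_cons.1 ht with rfl | ht
      · simp; omega
      · have := (List.pairwise_cons.1 hl).1 t ht; simp; omega
    simp only [List.map_cons, List.sum_cons]
    omega

theorem sortCnt_spec (l : List Int) :
    ((sortCnt l).1).Pairwise (· ≤ ·) ∧ List.Perm ((sortCnt l).1) l ∧ (sortCnt l).2 = invC l := by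
  induction l using sortCnt.induct with
  | case1 l h =>
    rw [sortCnt, if_pos h]
    refine ⟨?_, List.Perm.refl l, ?_⟩
    · match l, h with
      | [], _ => simp
      | [x], _ => simp
    · match l, h with
      | [], _ => rfl
      | [x], _ => simp [invC]
  | case2 l h mid ihL ihR =>
    rw [sortCnt, if_neg h]
    simp only
    obtain ⟨sL, pL, cL⟩ := ihL
    obtain ⟨sR, pR, cR⟩ := ihR
    have hperm : List.Perm ((mergeCnt (sortCnt (l.take mid)).1 (sortCnt (l.drop mid)).1).1) l := by
      refine (mergeCnt_perm _ _).trans ?_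
      refine (List.Perm.append pL pR).trans ?_
      rw [List.take_append_drop]
    refine ⟨mergeCnt_sorted _ _ sL sR, hperm, ?_⟩
    rw [mergeCnt_count _ _ sL sR, cL, cR]
    have h1 : (((sortCnt (l.drop mid)).1).map (fun y => ((sortCnt (l.take mid)).1).countP (fun x => decide (y < x)))).sum
        = ((l.drop mid).map (fun y => (l.take mid).countP (fun x => decide (y < x)))).sum := by
      have hfun : (((sortCnt (l.drop mid)).1).map (fun y => ((sortCnt (l.take mid)).1).countP (fun x => decide (y < x))))
          = (((sortCnt (l.drop mid)).1).map (fun y => (l.take mid).countP (fun x => decide (y < x)))) :=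
        List.map_congr_left (fun y _ => pL.countP_eq _)
      rw [hfun]
      exact (pR.map _).sum_eq
    rw [h1, ← cross_swap]
    have h2 : invC l = invC (l.take mid ++ l.drop mid) := by rw [List.take_append_drop]
    rw [h2, invC_append]

theorem neg_one_pow_parity (n : Nat) :
    (if n % 2 == 0 then (1 : Int) else -1) = (-1) ^ n := by
  rcases Nat.even_or_odd n with h | h
  · rw [h.neg_one_pow]; simp [Nat.even_iff.1 h]
  · rw [h.neg_one_pow]; have := Nat.odd_iff.1 h; simp [this]

-- ===== VERDICT (by name: the statement is the Claim_ definition above) =====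
theorem blade_product_py_spec : Claim_equal_blade_product_py := by
  intro a b _
  unfold Spec_blade_product_py blade_product_py blade_product_py_alt
  simp only
  rw [outer_inv (a ++ b) (a ++ b).length (le_refl _)]
  simp only [List.take_length, List.drop_length, List.append_nil]
  obtain ⟨sS, pS, cS⟩ := sortCnt_spec (a ++ b)
  have hlist : (ISf ([], 0) (a ++ b)).1 = (sortCnt (a ++ b)).1 :=
    List.Perm.eq_of_pairwise' (ISf_sorted [] 0 (a ++ b) (by simp)) sS
      (((ISf_perm [] 0 (a ++ b)).trans (by simp)).trans pS.symm)
  have hcnt : (ISf ([], 0) (a ++ b)).2 = (sortCnt (a ++ b)).2 := by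
    rw [cS, ISf_count]
    simp
  rw [hlist, hcnt, cancelAB, neg_one_pow_parity]
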